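-- pv_equiv track=rewrite | github.com/klimes/mbelib | mbe.py | read_LCCSDT_MRCC
-- ===== SOURCE A (Python) =====
-- def read_LCCSDT_MRCC(filelist,return_list=False):
--    HF=[]
--    MP2c=[]
--    CCc=[]
--    CCTc=[]
--    CCT=[]
--    count=-1
--    for line in filelist:
--       if "Reference energy [au]:" in line:
--          #print line,
--          tmp=line.split()
--          HF.append(tmp[3])
--
--       #get LMP2 energies
--       if "LMP2 correlation energy [au]:" in line:
--          tmp=line.split()
--          MP2c.append(tmp[4])
--
--       #get LNO-CCSD correlation energy
--       if "CCSD correlation energy + 0.5 MP2 corrections [au]" in line: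
--          tmp=line.split()
--          CCc.append(tmp[8])
--
--       #get LNO-CCSD(T) correlation energy
--       if "CCSD(T) correlation energy + MP2 corrections [au]" in line:
--          tmp=line.split()
--          CCTc.append(tmp[7])
--
--       #get LNO-CCSD(T) energies
--       if "Total LNO-CCSD(T) energy" in line:
--          tmp=line.split()
--          CCT.append(tmp[7])
--
--    if return_list==True:
--       return [HF, MP2c, CCc, CCTc, CCT]
--    else:
--       return HF, MP2c, CCc, CCTc, CCT
-- ===== SOURCE B (Python) =====
-- def read_LCCSDT_MRCC(filelist, return_list=False):
--     def grab(pat, idx):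
--         return [line.split()[idx] for line in filelist if pat in line]
--     HF   = grab("Reference energy [au]:", 3)
--     MP2c = grab("LMP2 correlation energy [au]:", 4)
--     CCc  = grab("CCSD correlation energy + 0.5 MP2 corrections [au]", 8)
--     CCTc = grab("CCSD(T) correlation energy + MP2 corrections [au]", 7)
--     CCT  = grab("Total LNO-CCSD(T) energy", 7)
--     if return_list == True:
--         return [HF, MP2c, CCc, CCTc, CCT]
--     else:
--         return HF, MP2c, CCc, CCTc, CCT
-- ===== Notes on version B (the rewrite author's own statement) =====
-- stated objective: simpler
-- what changed: Replaced the single stateful loop that appends into five mutable lists with five independent per-pattern list comprehensions (filter-then-extract), one per energy kind.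
import Mathlib
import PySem

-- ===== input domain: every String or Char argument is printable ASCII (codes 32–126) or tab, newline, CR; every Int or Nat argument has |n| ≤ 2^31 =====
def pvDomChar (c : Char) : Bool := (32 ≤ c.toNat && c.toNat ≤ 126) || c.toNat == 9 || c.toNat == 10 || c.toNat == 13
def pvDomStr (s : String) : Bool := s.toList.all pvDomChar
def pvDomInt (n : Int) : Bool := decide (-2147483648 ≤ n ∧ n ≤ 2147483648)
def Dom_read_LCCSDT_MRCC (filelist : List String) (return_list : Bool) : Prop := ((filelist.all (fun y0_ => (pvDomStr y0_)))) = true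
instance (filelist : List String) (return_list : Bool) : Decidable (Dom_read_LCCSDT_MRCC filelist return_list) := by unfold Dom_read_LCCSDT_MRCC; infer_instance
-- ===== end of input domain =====

-- B changes the decomposition only (five per-pattern comprehensions instead of one stateful loop); return value identical.

-- ===== PORT A =====
-- one loop step: the five sequential 'if pattern in line: append(line.split()[idx])' of A;
-- tmp[idx] is ported as pyGetD with default "" — exact under Pre_, which requires the index in range on matching lines
def pvStepA (st : List String × List String × List String × List String × List String) (line : String) :
    List String × List String × List String × List String × List String :=
  let tmp := PySem.Str.split₀ line
  let hf := if PySem.Str.isIn "Reference energy [au]:" line then st.1 ++ [PySem.List.pyGetD tmp 3 ""] else st.1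
  let mp := if PySem.Str.isIn "LMP2 correlation energy [au]:" line then st.2.1 ++ [PySem.List.pyGetD tmp 4 ""] else st.2.1
  let cc := if PySem.Str.isIn "CCSD correlation energy + 0.5 MP2 corrections [au]" line then st.2.2.1 ++ [PySem.List.pyGetD tmp 8 ""] else st.2.2.1
  let cct := if PySem.Str.isIn "CCSD(T) correlation energy + MP2 corrections [au]" line then st.2.2.2.1 ++ [PySem.List.pyGetD tmp 7 ""] else st.2.2.2.1
  let ct := if PySem.Str.isIn "Total LNO-CCSD(T) energy" line then st.2.2.2.2 ++ [PySem.List.pyGetD tmp 7 ""] else st.2.2.2.2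
  (hf, mp, cc, cct, ct)

def read_LCCSDT_MRCC (filelist : List String) (return_list : Bool) :
    List String × List String × List String × List String × List String :=
  let st := filelist.foldl pvStepA ([], [], [], [], [])
  -- Python returns a 5-list or a 5-tuple; both carry the same five lists, so both map to this product
  if return_list == true then (st.1, st.2.1, st.2.2.1, st.2.2.2.1, st.2.2.2.2)
  else (st.1, st.2.1, st.2.2.1, st.2.2.2.1, st.2.2.2.2)

-- ===== PORT B =====
-- [line.split()[idx] for line in filelist if pat in line]
def pvGrab (filelist : List String) (pat : String) (idx : Int) : List String :=
  (filelist.filter (fun line => PySem.Str.isIn pat line)).map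
    (fun line => PySem.List.pyGetD (PySem.Str.split₀ line) idx "")

def read_LCCSDT_MRCC_alt (filelist : List String) (return_list : Bool) :
    List String × List String × List String × List String × List String :=
  let HF := pvGrab filelist "Reference energy [au]:" 3
  let MP2c := pvGrab filelist "LMP2 correlation energy [au]:" 4
  let CCc := pvGrab filelist "CCSD correlation energy + 0.5 MP2 corrections [au]" 8
  let CCTc := pvGrab filelist "CCSD(T) correlation energy + MP2 corrections [au]" 7
  let CCT := pvGrab filelist "Total LNO-CCSD(T) energy" 7
  if return_list == true then (HF, MP2c, CCc, CCTc, CCT)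
  else (HF, MP2c, CCc, CCTc, CCT)

-- ===== PRECONDITION & SPEC =====
-- Pre_ excludes exactly the lines on which Python A raises IndexError: a line containing one of the
-- five patterns whose whitespace-split has too few fields for that pattern's index (B raises there too).
def Pre_read_LCCSDT_MRCC (filelist : List String) (return_list : Bool) : Prop :=
  ∀ line ∈ filelist,
    (PySem.Str.isIn "Reference energy [au]:" line = true → 3 < (PySem.Str.split₀ line).length) ∧
    (PySem.Str.isIn "LMP2 correlation energy [au]:" line = true → 4 < (PySem.Str.split₀ line).length) ∧
    (PySem.Str.isIn "CCSD correlation energy + 0.5 MP2 corrections [au]" line = true → 8 < (PySem.Str.split₀ line).length) ∧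
    (PySem.Str.isIn "CCSD(T) correlation energy + MP2 corrections [au]" line = true → 7 < (PySem.Str.split₀ line).length) ∧
    (PySem.Str.isIn "Total LNO-CCSD(T) energy" line = true → 7 < (PySem.Str.split₀ line).length)
instance (filelist : List String) (return_list : Bool) : Decidable (Pre_read_LCCSDT_MRCC filelist return_list) := by
  unfold Pre_read_LCCSDT_MRCC; infer_instance

def pvWitness_read_LCCSDT_MRCC : List String × Bool :=
  (["Reference energy [au]: -1.5", "some other line"], false)

def Spec_read_LCCSDT_MRCC (filelist : List String) (return_list : Bool)
    (out : List String × List String × List String × List String × List String) : Prop :=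
  out = read_LCCSDT_MRCC_alt filelist return_list
instance (filelist : List String) (return_list : Bool)
    (out : List String × List String × List String × List String × List String) :
    Decidable (Spec_read_LCCSDT_MRCC filelist return_list out) := by
  unfold Spec_read_LCCSDT_MRCC; infer_instance

-- ===== CLAIM (what is proved, stated in full; the proofs are below) =====
def Claim_equal_read_LCCSDT_MRCC : Prop := ∀ (filelist : List String) (return_list : Bool), Dom_read_LCCSDT_MRCC filelist return_list → Pre_read_LCCSDT_MRCC filelist return_list → Spec_read_LCCSDT_MRCC filelist return_list (read_LCCSDT_MRCC filelist return_list)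

-- ===== LEMMAS AND PROOFS =====

-- loop invariant: A's fold extends each accumulator by the corresponding per-pattern comprehension of B
theorem pvFoldA_eq (ls : List String) (a b c d e : List String) :
    ls.foldl pvStepA (a, b, c, d, e) =
      (a ++ pvGrab ls "Reference energy [au]:" 3,
       b ++ pvGrab ls "LMP2 correlation energy [au]:" 4,
       c ++ pvGrab ls "CCSD correlation energy + 0.5 MP2 corrections [au]" 8,
       d ++ pvGrab ls "CCSD(T) correlation energy + MP2 corrections [au]" 7,
       e ++ pvGrab ls "Total LNO-CCSD(T) energy" 7) := by
  induction ls generalizing a b c d e with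
  | nil => simp [pvGrab]
  | cons l ls ih =>
      simp only [List.foldl_cons, pvStepA]
      rw [ih]
      simp only [pvGrab, List.filter_cons]
      split_ifs <;> simp

theorem read_LCCSDT_MRCC_spec : Claim_equal_read_LCCSDT_MRCC := by
  intro filelist return_list _ _
  unfold Spec_read_LCCSDT_MRCC read_LCCSDT_MRCC read_LCCSDT_MRCC_alt
  rw [pvFoldA_eq]
  cases return_list <;> simp

-- ===== VERDICT moved below as required =====
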